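-- pv_equiv track=rewrite | github.com/hellkvist/adventofcode | 2024/5/main.py | filter_valid_updates
-- ===== SOURCE A (Python) =====
-- def validate_update(instructions, update):
--     flag = True
--     for i, value in enumerate(update):
--         for value_in_front in update[0:i]:
--             if value_in_front in instructions[str(value)]:
--                 flag = False
--                 break
--         if not flag:
--             break
--     return flag
--
-- def filter_valid_updates(instructions: dict[str, set[int]], updates: list[list[int]]):
--     valid_updates = []
--     flags = []
--
--     for update in updates:
--         flag = validate_update(instructions, update)
--         flags.append(flag)
--
--     valid_updates = [updates[i] for i, flag in enumerate(flags) if flag]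
--     invalid_updates = [updates[i] for i, flag in enumerate(flags) if not flag]
--     return valid_updates, invalid_updates
-- ===== SOURCE B (Python) =====
-- def filter_valid_updates(instructions: dict[str, set[int]], updates: list[list[int]]):
--     valid_updates = []
--     invalid_updates = []
--     for update in updates:
--         first_idx = {}
--         for pos, v in enumerate(update):
--             if v not in first_idx:
--                 first_idx[v] = pos
--         n = len(update)
--         ok = True
--         for i, value in enumerate(update):
--             if i > 0 and any(first_idx.get(s, n) < i for s in instructions[str(value)]):
--                 ok = False
--                 break
--         if ok:
--             valid_updates.append(update)
--         else:
--             invalid_updates.append(update)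
--     return valid_updates, invalid_updates
-- ===== Notes on version B (the rewrite author's own statement) =====
-- stated objective: alternative
-- what changed: B replaces A's per-position rescans of the update prefix with a first-occurrence index dict built once per update, testing each value's rule successors against their recorded positions, and builds the valid/invalid split in a single pass instead of a flags list plus two indexed comprehensions.
import Mathlib
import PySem

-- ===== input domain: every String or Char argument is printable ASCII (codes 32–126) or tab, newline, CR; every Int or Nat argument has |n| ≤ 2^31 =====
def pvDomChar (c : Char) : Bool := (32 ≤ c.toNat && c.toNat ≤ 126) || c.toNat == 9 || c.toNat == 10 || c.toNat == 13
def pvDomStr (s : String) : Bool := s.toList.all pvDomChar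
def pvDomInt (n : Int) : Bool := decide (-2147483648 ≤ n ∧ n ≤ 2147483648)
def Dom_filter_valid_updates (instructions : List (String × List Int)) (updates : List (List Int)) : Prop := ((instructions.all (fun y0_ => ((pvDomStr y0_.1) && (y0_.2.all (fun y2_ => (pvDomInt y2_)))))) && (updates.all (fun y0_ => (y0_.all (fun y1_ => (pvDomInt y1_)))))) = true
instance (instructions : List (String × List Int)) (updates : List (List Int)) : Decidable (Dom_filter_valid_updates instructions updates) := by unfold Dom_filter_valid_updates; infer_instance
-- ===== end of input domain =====

-- B replaces A's quadratic prefix re-scans by a first-occurrence index dict per update, checking each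
-- value's rule successors against positions, and builds the valid/invalid split in a single pass
-- instead of a flags list plus two indexed comprehensions (objective: alternative).

-- ===== PORT A =====
-- inner loop: 'for value_in_front in update[0:i]: if value_in_front in instructions[str(value)] …'
def pvInnerA (s : List Int) : List Int → Bool
  | [] => true
  | v :: rest => if s.contains v then false else pvInnerA s rest

-- outer loop: 'for i, value in enumerate(update)', with short-circuit on flag = False
def pvOuterA (instructions : List (String × List Int)) (update : List Int) (i : Nat) : List Int → Bool
  | [] => true
  | value :: rest =>
    if pvInnerA ((PySem.Dict.mk instructions).getD (PySem.Int.toStr value) [])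
        (PySem.List.slice update (some 0) (some (i : Int))) then
      pvOuterA instructions update (i + 1) rest
    else false

def pvValidateA (instructions : List (String × List Int)) (update : List Int) : Bool :=
  pvOuterA instructions update 0 update

-- '[updates[i] for i, flag in enumerate(flags) if flag]'
def pvComprTrue (updates : List (List Int)) (i : Nat) : List Bool → List (List Int)
  | [] => []
  | flag :: rest =>
    if flag then ((PySem.List.pyGet? updates (i : Int)).getD []) :: pvComprTrue updates (i + 1) rest
    else pvComprTrue updates (i + 1) rest

-- '[updates[i] for i, flag in enumerate(flags) if not flag]'
def pvComprFalse (updates : List (List Int)) (i : Nat) : List Bool → List (List Int)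
  | [] => []
  | flag :: rest =>
    if flag then pvComprFalse updates (i + 1) rest
    else ((PySem.List.pyGet? updates (i : Int)).getD []) :: pvComprFalse updates (i + 1) rest

def filter_valid_updates (instructions : List (String × List Int)) (updates : List (List Int)) : List (List Int) × List (List Int) :=
  let flags := updates.foldl (fun acc u => acc ++ [pvValidateA instructions u]) []
  (pvComprTrue updates 0 flags, pvComprFalse updates 0 flags)

-- ===== PORT B =====
-- 'for pos, v in enumerate(update): if v not in first_idx: first_idx[v] = pos'
def pvBuildIdx (d : PySem.Dict Int Int) (pos : Nat) : List Int → PySem.Dict Int Int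
  | [] => d
  | v :: rest => pvBuildIdx (if d.contains v then d else d.insert v (pos : Int)) (pos + 1) rest

-- 'for i, value in enumerate(update): if i > 0 and any(first_idx.get(s, n) < i for s in instructions[str(value)]) …'
def pvGoB (instructions : List (String × List Int)) (fi : PySem.Dict Int Int) (n : Int) (i : Nat) : List Int → Bool
  | [] => true
  | value :: rest =>
    if decide (0 < i) && ((PySem.Dict.mk instructions).getD (PySem.Int.toStr value) []).any
        (fun s => decide (PySem.Dict.getD fi s n < (i : Int))) then false
    else pvGoB instructions fi n (i + 1) rest

def pvValidB (instructions : List (String × List Int)) (update : List Int) : Bool :=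
  pvGoB instructions (pvBuildIdx PySem.Dict.empty 0 update) (PySem.List.len update) 0 update

def filter_valid_updates_alt (instructions : List (String × List Int)) (updates : List (List Int)) : List (List Int) × List (List Int) :=
  updates.foldl
    (fun acc u => if pvValidB instructions u then (acc.1 ++ [u], acc.2) else (acc.1, acc.2 ++ [u]))
    ([], [])

-- ===== PRECONDITION & SPEC =====
-- Pre_ excludes exactly the inputs where the Python A raises KeyError: some update has, at a position
-- i ≥ 1 that the scan actually reaches (no earlier position already exhibits a violation), a value whose
-- str() is not a key of instructions.  (B raises KeyError on exactly the same inputs.)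
def Pre_filter_valid_updates (instructions : List (String × List Int)) (updates : List (List Int)) : Prop :=
  ∀ u ∈ updates, ∀ i : Nat, i < u.length → 1 ≤ i →
    ((PySem.Dict.mk instructions).get? (PySem.Int.toStr (u.getD i 0))).isSome = false →
    ∃ j < i, 1 ≤ j ∧ ((PySem.Dict.mk instructions).get? (PySem.Int.toStr (u.getD j 0))).isSome = true ∧
      ∃ k < j, ((PySem.Dict.mk instructions).getD (PySem.Int.toStr (u.getD j 0)) []).contains (u.getD k 0) = true
instance (instructions : List (String × List Int)) (updates : List (List Int)) : Decidable (Pre_filter_valid_updates instructions updates) := by unfold Pre_filter_valid_updates; infer_instance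

def pvWitness_filter_valid_updates : (List (String × List Int)) × List (List Int) :=
  ([("2", [1]), ("1", [])], [[1, 2], [2, 1]])

def Spec_filter_valid_updates (instructions : List (String × List Int)) (updates : List (List Int)) (out : List (List Int) × List (List Int)) : Prop := out = filter_valid_updates_alt instructions updates
instance (instructions : List (String × List Int)) (updates : List (List Int)) (out : List (List Int) × List (List Int)) : Decidable (Spec_filter_valid_updates instructions updates out) := by unfold Spec_filter_valid_updates; infer_instance

-- ===== CLAIM (what is proved, stated in full; the proofs are below) =====
def Claim_equal_filter_valid_updates : Prop := ∀ (instructions : List (String × List Int)) (updates : List (List Int)), Dom_filter_valid_updates instructions updates → Pre_filter_valid_updates instructions updates → Spec_filter_valid_updates instructions updates (filter_valid_updates instructions updates)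

-- ===== LEMMAS AND PROOFS =====

-- A's inner loop is 'no prefix element belongs to the successor set'.
theorem pvInnerA_eq_any (s : List Int) (p : List Int) :
    pvInnerA s p = !(p.any fun v => s.contains v) := by
  induction p with
  | nil => simp [pvInnerA]
  | cons v rest ih => by_cases h : s.contains v <;> simp [pvInnerA, h, ih]  -- h is needed in one branch

-- the first-occurrence dict maps x to its first index (offset by pos), missing keys stay missing
theorem pvBuildIdx_get? (u : List Int) (d : PySem.Dict Int Int) (pos : Nat) (x : Int) :
    (pvBuildIdx d pos u).get? x =
      (match d.get? x with
        | some k => some k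
        | none => (List.idxOf? x u).map (fun m => ((pos + m : Nat) : Int))) := by
  induction u generalizing d pos with
  | nil => cases h : d.get? x <;> simp [pvBuildIdx, h]
  | cons v rest ih =>
    simp only [pvBuildIdx]
    rw [ih]
    by_cases hvx : v = x
    · subst hvx
      cases hd : d.get? v with
      | some k =>
        have hc : d.contains v = true := by simp [PySem.Dict.contains_eq_isSome_get?, hd]
        simp [hc, hd]
      | none =>
        have hc : d.contains v = false := by simp [PySem.Dict.contains_eq_isSome_get?, hd]
        simp [hc, hd, List.idxOf?_cons, PySem.Dict.get?_insert_self]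
    · have hbe : (v == x) = false := by simpa using hvx
      have hgx : (if d.contains v then d else d.insert v (pos : Int)).get? x = d.get? x := by
        by_cases hc : d.contains v
        · simp [hc]
        · simp [hc, PySem.Dict.get?_insert_of_ne _ _ (fun h => hvx h.symm)]
      rw [hgx]
      cases hdx : d.get? x with
      | some k => simp
      | none =>
        simp only [List.idxOf?_cons, hbe, Bool.false_eq_true, if_false, Option.map_map]
        congr 1
        funext m
        simp
        omega

-- membership in a prefix is 'first index < i'
theorem mem_take_iff_idxOf? (u : List Int) (x : Int) (i : Nat) :
    x ∈ u.take i ↔ ∃ m, List.idxOf? x u = some m ∧ m < i := by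
  induction u generalizing i with
  | nil => simp
  | cons v rest ih =>
    cases i with
    | zero => simp
    | succ i' =>
      by_cases hvx : v = x
      · subst hvx
        simp [List.idxOf?_cons]
      · have hbe : (v == x) = false := by simpa using hvx
        simp only [List.take_succ_cons, List.mem_cons, List.idxOf?_cons, hbe, Bool.false_eq_true,
          if_false, ih]
        constructor
        · rintro (h | ⟨m, hm, hlt⟩)
          · exact absurd h.symm hvx
          · exact ⟨m + 1, by simp [hm], by omega⟩
        · rintro ⟨m, hm, hlt⟩
          cases hio : List.idxOf? x rest with
          | none => simp [hio] at hm
          | some m' =>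
            rw [hio] at hm
            simp at hm
            exact Or.inr ⟨m', rfl, by omega⟩

-- the position test against the first-occurrence dict is prefix membership
theorem pvFi_lt_iff (u : List Int) (x : Int) (i : Nat) (hi : i ≤ u.length) :
    (PySem.Dict.getD (pvBuildIdx PySem.Dict.empty 0 u) x (PySem.List.len u) < (i : Int)) ↔ x ∈ u.take i := by
  have hget := pvBuildIdx_get? u PySem.Dict.empty 0 x
  simp only [PySem.Dict.get?_empty] at hget
  rw [mem_take_iff_idxOf?]
  unfold PySem.Dict.getD
  rw [hget]
  cases hio : List.idxOf? x u with
  | none =>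
    simp [PySem.List.len_eq]
    omega
  | some m =>
    simp

-- conditions at one loop position agree
theorem pvCond_eq (instructions : List (String × List Int)) (u : List Int) (value : Int) (i : Nat)
    (hi : i ≤ u.length) (hpos : 0 < i) :
    pvInnerA ((PySem.Dict.mk instructions).getD (PySem.Int.toStr value) [])
        (PySem.List.slice u (some 0) (some (i : Int)))
      = !(decide (0 < i) && ((PySem.Dict.mk instructions).getD (PySem.Int.toStr value) []).any
          (fun s => decide (PySem.Dict.getD (pvBuildIdx PySem.Dict.empty 0 u) s (PySem.List.len u) < (i : Int)))) := by
  rw [pvInnerA_eq_any]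
  simp only [PySem.List.slice_zero_start, PySem.List.slice_to_natCast]
  congr 1
  rw [Bool.eq_iff_iff]
  simp only [List.any_eq_true, decide_eq_true_eq, hpos, true_and, Bool.and_eq_true, List.contains_eq_mem]
  constructor
  · rintro ⟨v, hv, hmem⟩
    exact ⟨v, by simpa using hmem, (pvFi_lt_iff u v i hi).mpr hv⟩
  · rintro ⟨s, hs, hlt⟩
    exact ⟨s, (pvFi_lt_iff u s i hi).mp hlt, by simpa using hs⟩

-- the two per-update loops agree step for step
theorem pvLoop_eq (instructions : List (String × List Int)) (u : List Int) :
    ∀ (rest : List Int) (i : Nat), i + rest.length ≤ u.length →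
    pvOuterA instructions u i rest
      = pvGoB instructions (pvBuildIdx PySem.Dict.empty 0 u) (PySem.List.len u) i rest := by
  intro rest
  induction rest with
  | nil => intro i _; simp [pvOuterA, pvGoB]
  | cons value rest ih =>
    intro i hle
    simp only [pvOuterA, pvGoB]
    by_cases hpos : 0 < i
    · rw [pvCond_eq instructions u value i (by simp at hle; omega) hpos]
      cases hb : ((decide (0 < i) && ((PySem.Dict.mk instructions).getD (PySem.Int.toStr value) []).any
          (fun s => decide (PySem.Dict.getD (pvBuildIdx PySem.Dict.empty 0 u) s (PySem.List.len u) < (i : Int))))) with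
      | true => simp
      | false => simp; exact ih (i + 1) (by simp at hle ⊢; omega)
    · have hi0 : i = 0 := by omega
      subst hi0
      have hsl : PySem.List.slice u (some 0) (some ((0 : Nat) : Int)) = [] := by
        rw [PySem.List.slice_zero_start, PySem.List.slice_to_natCast]
        simp
      rw [hsl]
      simp only [pvInnerA, if_true, Nat.zero_add, lt_irrefl, decide_false,
        Bool.false_and, Bool.false_eq_true, if_false]
      exact ih 1 (by simp at hle ⊢; omega)

theorem pvValid_eq (instructions : List (String × List Int)) (u : List Int) :
    pvValidateA instructions u = pvValidB instructions u :=
  pvLoop_eq instructions u u 0 (by omega)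

-- flags loop is a map
theorem pvFlags_eq (instructions : List (String × List Int)) (updates : List (List Int)) :
    ∀ acc : List Bool,
    updates.foldl (fun acc u => acc ++ [pvValidateA instructions u]) acc
      = acc ++ updates.map (pvValidateA instructions) := by
  induction updates with
  | nil => intro acc; simp
  | cons u rest ih => intro acc; simp [List.foldl_cons, ih]

-- the indexed comprehensions over 'map f' are filters
theorem pvComprTrue_eq (updates : List (List Int)) (f : List Int → Bool) :
    ∀ (tail : List (List Int)) (i : Nat), updates.drop i = tail →
    pvComprTrue updates i (tail.map f) = tail.filter f := by
  intro tail
  induction tail with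
  | nil => intro i _; simp [pvComprTrue]
  | cons v t ih =>
    intro i hdrop
    have hget : updates[i]? = some v := by
      have : (updates.drop i)[0]? = some v := by rw [hdrop]; rfl
      simpa using this
    have hdrop' : updates.drop (i + 1) = t := by
      have h := congrArg List.tail hdrop
      simpa [List.tail_drop] using h
    simp only [List.map_cons, pvComprTrue, PySem.List.pyGet?_natCast, hget, Option.getD_some,
      List.filter_cons]
    by_cases hf : f v <;> simp [hf, ih (i + 1) hdrop']

theorem pvComprFalse_eq (updates : List (List Int)) (f : List Int → Bool) :
    ∀ (tail : List (List Int)) (i : Nat), updates.drop i = tail →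
    pvComprFalse updates i (tail.map f) = tail.filter (fun u => !f u) := by
  intro tail
  induction tail with
  | nil => intro i _; simp [pvComprFalse]
  | cons v t ih =>
    intro i hdrop
    have hget : updates[i]? = some v := by
      have : (updates.drop i)[0]? = some v := by rw [hdrop]; rfl
      simpa using this
    have hdrop' : updates.drop (i + 1) = t := by
      have h := congrArg List.tail hdrop
      simpa [List.tail_drop] using h
    simp only [List.map_cons, pvComprFalse, PySem.List.pyGet?_natCast, hget, Option.getD_some,
      List.filter_cons]
    by_cases hf : f v <;> simp [hf, ih (i + 1) hdrop']

-- B's single pass is the pair of filters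
theorem pvFoldB_eq (instructions : List (String × List Int)) (updates : List (List Int)) :
    ∀ (a b : List (List Int)),
    updates.foldl
        (fun acc u => if pvValidB instructions u then (acc.1 ++ [u], acc.2) else (acc.1, acc.2 ++ [u]))
        (a, b)
      = (a ++ updates.filter (pvValidB instructions),
         b ++ updates.filter (fun u => !pvValidB instructions u)) := by
  induction updates with
  | nil => intro a b; simp
  | cons u rest ih =>
    intro a b
    by_cases h : pvValidB instructions u <;> simp [List.foldl_cons, h, ih]

theorem pvMain (instructions : List (String × List Int)) (updates : List (List Int)) :
    filter_valid_updates instructions updates = filter_valid_updates_alt instructions updates := by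
  unfold filter_valid_updates filter_valid_updates_alt
  rw [pvFlags_eq instructions updates []]
  simp only [List.nil_append]
  rw [pvComprTrue_eq updates (pvValidateA instructions) updates 0 rfl,
      pvComprFalse_eq updates (pvValidateA instructions) updates 0 rfl,
      pvFoldB_eq instructions updates [] []]
  simp only [List.nil_append]
  have h1 : updates.filter (pvValidateA instructions) = updates.filter (pvValidB instructions) :=
    List.filter_congr (fun u _ => pvValid_eq instructions u)
  have h2 : updates.filter (fun u => !pvValidateA instructions u)
      = updates.filter (fun u => !pvValidB instructions u) :=
    List.filter_congr (fun u _ => by rw [pvValid_eq instructions u])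
  rw [h1, h2]

-- ===== VERDICT (by name: the statement is the Claim_ definition above) =====
theorem filter_valid_updates_spec : Claim_equal_filter_valid_updates := by
  intro instructions updates _ _
  unfold Spec_filter_valid_updates
  exact pvMain instructions updates
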